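-- pv_equiv track=rewrite | github.com/hongjinchen/Holly_Leetcode | meituan_spring_3.py | count_merges
-- ===== SOURCE A (Python) =====
-- def count_merges(arr, k):
--     n = len(arr)
--     dp = [[0] * n for _ in range(n)]
--
--     # 初始化单个元素的情况
--     for i in range(n):
--         dp[i][i] = 1 if arr[i] >= k else 0
--
--     # 填充dp数组
--     for length in range(2, n+1):  # 子数组的长度
--         for i in range(n - length + 1):
--             j = i + length - 1
--             for m in range(i, j):
--                 sum_value = sum(arr[i:m+1]) + sum(arr[m+1:j+1])
--                 if sum_value >= k:
--                     dp[i][j] += dp[i][m] * dp[m+1][j]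
--
--     return dp[0][n-1]
-- ===== SOURCE B (Python) =====
-- def count_merges(arr, k):
--     n = len(arr)
--     pre = [0]
--     for x in arr:
--         pre.append(pre[-1] + x)
--     memo = {}
--
--     def go(i, j):
--         if i == j:
--             return 1 if arr[i] >= k else 0
--         if (i, j) in memo:
--             return memo[(i, j)]
--         total = 0
--         if pre[j + 1] - pre[i] >= k:
--             for m in range(i, j):
--                 total += go(i, m) * go(m + 1, j)
--         memo[(i, j)] = total
--         return total
--
--     return go(0, n - 1)
-- ===== Notes on version B (the rewrite author's own statement) =====
-- stated objective: faster
-- what changed: Replaced the bottom-up length/i/m triple loop with repeated O(n) slice sums by a top-down memoized recursion over intervals using a prefix-sum array, so the range-sum test is one O(1) lookup per interval and unreachable intervals are never computed: O(n^4) -> O(n^3).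
import Mathlib
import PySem

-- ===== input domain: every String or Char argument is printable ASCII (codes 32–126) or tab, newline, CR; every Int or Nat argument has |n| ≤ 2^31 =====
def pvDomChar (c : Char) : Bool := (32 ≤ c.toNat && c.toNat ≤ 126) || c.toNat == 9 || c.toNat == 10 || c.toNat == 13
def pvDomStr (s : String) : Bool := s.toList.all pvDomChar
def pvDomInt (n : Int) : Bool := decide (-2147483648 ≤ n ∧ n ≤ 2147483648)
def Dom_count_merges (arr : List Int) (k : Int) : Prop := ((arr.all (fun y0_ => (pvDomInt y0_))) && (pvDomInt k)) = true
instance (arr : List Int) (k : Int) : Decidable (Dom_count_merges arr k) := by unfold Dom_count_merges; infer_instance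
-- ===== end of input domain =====

-- B replaces A's bottom-up length/i/m triple loop with per-step slice sums by a top-down
-- memoized recursion over intervals with a prefix-sum array: O(n^4) -> O(n^3).


-- ===== PORT A =====
-- dp (a Python list of lists, each cell written individually) is modelled as a dict
-- keyed by (row, column); a never-written cell reads as 0, exactly the 0 the Python
-- matrix holds there. All index arithmetic stays inside 0..n-1, where this model is exact.
def count_merges (arr : List Int) (k : Int) : Int :=
  let n : Int := (arr.length : Int)
  let dp0 : PySem.Dict (Int × Int) Int := PySem.Dict.empty
  let dp1 := (PySem.List.pyRange 0 n 1).foldl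
    (fun dp i => dp.insert (i, i) (if PySem.List.pyGetD arr i 0 ≥ k then 1 else 0)) dp0
  let dp2 := (PySem.List.pyRange 2 (n + 1) 1).foldl
    (fun dp length =>
      (PySem.List.pyRange 0 (n - length + 1) 1).foldl
        (fun dp i =>
          let j := i + length - 1
          (PySem.List.pyRange i j 1).foldl
            (fun dp m =>
              let sum_value := (PySem.List.slice arr (some i) (some (m + 1))).sum
                             + (PySem.List.slice arr (some (m + 1)) (some (j + 1))).sum
              if sum_value ≥ k then
                dp.insert (i, j) (dp.getD (i, j) 0 + dp.getD (i, m) 0 * dp.getD (m + 1, j) 0)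
              else dp) dp) dp) dp1
  dp2.getD (0, n - 1) 0

-- ===== PORT B =====
-- B's memoized recursive helper go(i, j); the Python memo dict is threaded through as
-- state, and fuel is only the port's termination device: the entry point passes
-- fuel = (n-1).toNat, which a call with i < j can never exhaust (the recursion depth on
-- j - i is bounded by it), and for i > j (only reachable for arr = [], outside Pre_) the
-- fuel-0 branch stores and returns 0 exactly as Python's empty loop does.
def pvGoB (arr pre : List Int) (k : Int) : Nat → Int → Int → PySem.Dict (Int × Int) Int → Int × PySem.Dict (Int × Int) Int
  | 0, i, j, memo =>
      if i = j then ((if PySem.List.pyGetD arr i 0 ≥ k then 1 else 0), memo)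
      else
        match memo.get? (i, j) with
        | some v => (v, memo)
        | none => (0, memo.insert (i, j) 0)
  | f + 1, i, j, memo =>
      if i = j then ((if PySem.List.pyGetD arr i 0 ≥ k then 1 else 0), memo)
      else
        match memo.get? (i, j) with
        | some v => (v, memo)
        | none =>
          let st :=
            if PySem.List.pyGetD pre (j + 1) 0 - PySem.List.pyGetD pre i 0 ≥ k then
              (PySem.List.pyRange i j 1).foldl
                (fun s m =>
                  let r1 := pvGoB arr pre k f i m s.2
                  let r2 := pvGoB arr pre k f (m + 1) j r1.2
                  (s.1 + r1.1 * r2.1, r2.2)) ((0 : Int), memo)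
            else ((0 : Int), memo)
          (st.1, st.2.insert (i, j) st.1)

def count_merges_alt (arr : List Int) (k : Int) : Int :=
  let n : Int := (arr.length : Int)
  let pre : List Int := arr.foldl (fun pre x => pre ++ [PySem.List.pyGetD pre (-1) 0 + x]) [0]
  (pvGoB arr pre k (n - 1).toNat 0 (n - 1) PySem.Dict.empty).1

-- ===== PRECONDITION & SPEC =====
-- Pre_ excludes only the empty list, on which Python A raises IndexError (dp[0][-1] on an empty dp).
def Pre_count_merges (arr : List Int) (k : Int) : Prop := arr ≠ []
instance (arr : List Int) (k : Int) : Decidable (Pre_count_merges arr k) := by unfold Pre_count_merges; infer_instance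
def pvWitness_count_merges : List Int × Int := ([1, 2, 3], 2)

def Spec_count_merges (arr : List Int) (k : Int) (out : Int) : Prop := out = count_merges_alt arr k
instance (arr : List Int) (k : Int) (out : Int) : Decidable (Spec_count_merges arr k out) := by unfold Spec_count_merges; infer_instance

-- ===== CLAIM (what is proved, stated in full; the proofs are below) =====
def Claim_equal_count_merges : Prop := ∀ (arr : List Int) (k : Int), Dom_count_merges arr k → Pre_count_merges arr k → Spec_count_merges arr k (count_merges arr k)

-- ===== LEMMAS AND PROOFS =====

-- The common mathematical value both programs compute: the interval count, defined by
-- fuel recursion (pvC) and at the canonical fuel (pvCI).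
def pvRS (arr : List Int) (i j : Int) : Int := (PySem.List.slice arr (some i) (some (j + 1))).sum

def pvC (arr : List Int) (k : Int) : Nat → Int → Int → Int
  | 0, i, j => if i = j then (if PySem.List.pyGetD arr i 0 ≥ k then 1 else 0) else 0
  | f + 1, i, j =>
    if i = j then (if PySem.List.pyGetD arr i 0 ≥ k then 1 else 0)
    else if pvRS arr i j ≥ k then
      ((PySem.List.pyRange i j 1).map (fun m => pvC arr k f i m * pvC arr k f (m + 1) j)).sum
    else 0

def pvCI (arr : List Int) (k : Int) (i j : Int) : Int := pvC arr k (j - i).toNat i j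

theorem pvC_zero (arr : List Int) (k : Int) (i j : Int) :
    pvC arr k 0 i j = if i = j then (if PySem.List.pyGetD arr i 0 ≥ k then 1 else 0) else 0 := rfl

theorem pvC_succ (arr : List Int) (k : Int) (f : Nat) (i j : Int) :
    pvC arr k (f + 1) i j =
      if i = j then (if PySem.List.pyGetD arr i 0 ≥ k then 1 else 0)
      else if pvRS arr i j ≥ k then
        ((PySem.List.pyRange i j 1).map (fun m => pvC arr k f i m * pvC arr k f (m + 1) j)).sum
      else 0 := rfl

theorem pvC_stable (arr : List Int) (k : Int) :
    ∀ (f : Nat) (i j : Int), (j - i).toNat ≤ f → pvC arr k (f + 1) i j = pvC arr k f i j := by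
  intro f
  induction f with
  | zero =>
    intro i j h
    rw [pvC_succ, pvC_zero]
    by_cases hij : i = j
    · rw [if_pos hij, if_pos hij]
    · have hj : j ≤ i := by omega
      rw [if_neg hij, if_neg hij, PySem.List.pyRange_one_eq_nil hj]
      simp
  | succ f ih =>
    intro i j h
    rw [pvC_succ, pvC_succ]
    by_cases hij : i = j
    · rw [if_pos hij, if_pos hij]
    · rw [if_neg hij, if_neg hij]
      by_cases hk : pvRS arr i j ≥ k
      · rw [if_pos hk, if_pos hk]
        congr 1
        apply List.map_congr_left
        intro m hm
        rw [PySem.List.mem_pyRange_one] at hm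
        rw [ih i m (by omega), ih (m + 1) j (by omega)]
      · rw [if_neg hk, if_neg hk]

theorem pvC_eq_pvCI (arr : List Int) (k : Int) :
    ∀ (f : Nat) (i j : Int), (j - i).toNat ≤ f → pvC arr k f i j = pvCI arr k i j := by
  intro f
  induction f with
  | zero =>
    intro i j h
    unfold pvCI
    have : (j - i).toNat = 0 := by omega
    rw [this]
  | succ f ih =>
    intro i j h
    by_cases h' : (j - i).toNat ≤ f
    · rw [pvC_stable arr k f i j h', ih i j h']
    · unfold pvCI
      have : (j - i).toNat = f + 1 := by omega
      rw [this]

theorem pvCI_diag (arr : List Int) (k : Int) (i : Int) :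
    pvCI arr k i i = (if PySem.List.pyGetD arr i 0 ≥ k then 1 else 0) := by
  unfold pvCI
  simp [pvC]

theorem pvCI_lt (arr : List Int) (k : Int) (i j : Int) (hij : i < j) :
    pvCI arr k i j =
      if pvRS arr i j ≥ k then
        ((PySem.List.pyRange i j 1).map (fun m => pvCI arr k i m * pvCI arr k (m + 1) j)).sum
      else 0 := by
  obtain ⟨t, ht⟩ : ∃ t, (j - i).toNat = t + 1 := ⟨(j - i).toNat - 1, by omega⟩
  have hL : pvCI arr k i j = pvC arr k (t + 1) i j := by unfold pvCI; rw [ht]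
  rw [hL, pvC_succ, if_neg (by omega : ¬ i = j)]
  by_cases hk : pvRS arr i j ≥ k
  · rw [if_pos hk, if_pos hk]
    congr 1
    apply List.map_congr_left
    intro m hm
    rw [PySem.List.mem_pyRange_one] at hm
    rw [pvC_eq_pvCI arr k t i m (by omega), pvC_eq_pvCI arr k t (m + 1) j (by omega)]
  · rw [if_neg hk, if_neg hk]

-- ---------- generic fold-invariant lemma over pyRange ----------
theorem pyRange_foldl_inv {α : Type} (P : Int → α → Prop) (f : α → Int → α) (a0 b : Int)
    (hstep : ∀ c y, a0 ≤ c → c < b → P c y → P (c + 1) (f y c)) :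
    ∀ (t : Nat) (a : Int) (x : α), (b - a).toNat = t → a0 ≤ a → a ≤ b → P a x →
      P b ((PySem.List.pyRange a b 1).foldl f x) := by
  intro t
  induction t with
  | zero =>
    intro a x ht ha hab hP
    have hba : a = b := by omega
    rw [PySem.List.pyRange_one_eq_nil (by omega)]
    simpa [hba] using hP
  | succ t ih =>
    intro a x ht ha hab hP
    have hlt : a < b := by omega
    rw [PySem.List.pyRange_one_cons hlt, List.foldl_cons]
    exact ih (a + 1) (f x a) (by omega) (by omega) (by omega) (hstep a x ha hlt hP)

-- ================= A-side =================
-- prefix sums of a list starting from running total s (for B's pre array)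
def pvPsums (s : Int) : List Int → List Int
  | [] => []
  | x :: t => (s + x) :: pvPsums (s + x) t

theorem pvPsums_getElem? (arr : List Int) (s : Int) (t : Nat) (ht : t < arr.length) :
    (pvPsums s arr)[t]? = some (s + (arr.take (t + 1)).sum) := by
  induction arr generalizing s t with
  | nil => simp at ht
  | cons x xs ih =>
    cases t with
    | zero => simp [pvPsums]
    | succ t =>
      simp only [pvPsums, List.getElem?_cons_succ]
      rw [ih (s + x) t (by simpa using ht)]
      simp [List.take_succ_cons, add_assoc]

theorem pre_loop_eq (arr : List Int) (ps : List Int) (s : Int)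
    (h : PySem.List.pyGetD ps (-1) 0 = s) :
    arr.foldl (fun pre x => pre ++ [PySem.List.pyGetD pre (-1) 0 + x]) ps = ps ++ pvPsums s arr := by
  induction arr generalizing ps s with
  | nil => simp [pvPsums]
  | cons x xs ih =>
    simp only [List.foldl_cons, pvPsums]
    rw [h, ih (ps ++ [s + x]) (s + x) (PySem.List.pyGetD_neg_one_append_singleton ps (s + x) 0)]
    simp

theorem pre_getElem (arr : List Int) (t : Nat) (ht : t ≤ arr.length) :
    PySem.List.pyGetD (arr.foldl (fun pre x => pre ++ [PySem.List.pyGetD pre (-1) 0 + x]) [0]) (t : Int) 0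
      = (arr.take t).sum := by
  rw [pre_loop_eq arr [0] 0 (by decide)]
  rw [PySem.List.pyGetD_natCast]
  cases t with
  | zero => simp
  | succ t =>
    have hlt : t < arr.length := by omega
    simp only [List.singleton_append, List.getD, List.getElem?_cons_succ]
    rw [pvPsums_getElem? arr 0 t hlt]
    simp

theorem sum_drop_take_split (l : List Int) (a b c : Nat) (hab : a ≤ b) (hbc : b ≤ c) :
    ((l.drop a).take (b - a)).sum + ((l.drop b).take (c - b)).sum = ((l.drop a).take (c - a)).sum := by
  have h1 : c - a = (b - a) + (c - b) := by omega
  rw [h1, List.take_add, List.sum_append, List.drop_drop]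
  have h2 : a + (b - a) = b := by omega
  rw [h2]

theorem sum_drop_take_eq (l : List Int) (a c : Nat) (hac : a ≤ c) :
    ((l.drop a).take (c - a)).sum = (l.take c).sum - (l.take a).sum := by
  have h := sum_drop_take_split l 0 a c (by omega) hac
  simp at h
  omega

theorem slice_sum_split (arr : List Int) (i m j : Int) (hi : 0 ≤ i) (him : i ≤ m) (hmj : m < j) :
    (PySem.List.slice arr (some i) (some (m + 1))).sum
      + (PySem.List.slice arr (some (m + 1)) (some (j + 1))).sum
      = pvRS arr i j := by
  unfold pvRS
  rw [PySem.List.slice_toNat arr hi (by omega), PySem.List.slice_toNat arr (by omega : (0:Int) ≤ m + 1) (by omega),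
      PySem.List.slice_toNat arr hi (by omega)]
  exact sum_drop_take_split arr i.toNat (m + 1).toNat (j + 1).toNat (by omega) (by omega)

theorem pre_diff (arr : List Int) (i j : Int) (hi : 0 ≤ i) (hij : i ≤ j + 1)
    (hj : j + 1 ≤ (arr.length : Int)) :
    PySem.List.pyGetD (arr.foldl (fun pre x => pre ++ [PySem.List.pyGetD pre (-1) 0 + x]) [0]) (j + 1) 0
      - PySem.List.pyGetD (arr.foldl (fun pre x => pre ++ [PySem.List.pyGetD pre (-1) 0 + x]) [0]) i 0
      = pvRS arr i j := by
  have h1 := pre_getElem arr (j + 1).toNat (by omega)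
  have h2 := pre_getElem arr i.toNat (by omega)
  rw [Int.toNat_of_nonneg (by omega : (0:Int) ≤ j + 1)] at h1
  rw [Int.toNat_of_nonneg hi] at h2
  unfold pvRS
  rw [h1, h2, PySem.List.slice_toNat arr hi (by omega),
      sum_drop_take_eq arr i.toNat (j + 1).toNat (by omega)]

-- A's innermost loop only reads cells other than (i,j), so it just accumulates into dp (i,j)
theorem inner_fold_eq (ms : List Int) (i j : Int) (dp : PySem.Dict (Int × Int) Int)
    (hne : ms ≠ []) (h : ∀ m ∈ ms, m ≠ j ∧ m + 1 ≠ i) :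
    ms.foldl (fun dp m =>
        dp.insert (i, j) (dp.getD (i, j) 0 + dp.getD (i, m) 0 * dp.getD (m + 1, j) 0)) dp
      = dp.insert (i, j) (dp.getD (i, j) 0
          + (ms.map (fun m => dp.getD (i, m) 0 * dp.getD (m + 1, j) 0)).sum) := by
  induction ms generalizing dp with
  | nil => exact absurd rfl hne
  | cons m t ih =>
    obtain ⟨hmj, hmi⟩ := h m List.mem_cons_self
    simp only [List.foldl_cons, List.map_cons, List.sum_cons]
    cases t with
    | nil => simp
    | cons m2 t2 =>
      rw [ih _ (by simp) (fun m' hm' => h m' (List.mem_cons_of_mem _ hm'))]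
      rw [PySem.Dict.insert_insert_self]
      have hjj : (dp.insert (i, j) (dp.getD (i, j) 0 + dp.getD (i, m) 0 * dp.getD (m + 1, j) 0)).getD (i, j) 0
          = dp.getD (i, j) 0 + dp.getD (i, m) 0 * dp.getD (m + 1, j) 0 :=
        PySem.Dict.getD_insert_self _ _ _ _
      have hmap : (m2 :: t2).map (fun m' =>
            (dp.insert (i, j) (dp.getD (i, j) 0 + dp.getD (i, m) 0 * dp.getD (m + 1, j) 0)).getD (i, m') 0
            * (dp.insert (i, j) (dp.getD (i, j) 0 + dp.getD (i, m) 0 * dp.getD (m + 1, j) 0)).getD (m' + 1, j) 0)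
          = (m2 :: t2).map (fun m' => dp.getD (i, m') 0 * dp.getD (m' + 1, j) 0) := by
        apply List.map_congr_left
        intro m' hm'
        obtain ⟨hm'j, hm'i⟩ := h m' (List.mem_cons_of_mem _ hm')
        rw [PySem.Dict.getD_insert_of_ne _ _ _ (by simp [hm'j]),
            PySem.Dict.getD_insert_of_ne _ _ _ (by simp [hm'i])]
      rw [hjj, hmap]
      congr 1
      ring

-- the clean per-(length, i) step A's inner loop amounts to
def pvStep (arr : List Int) (k L : Int) (dp : PySem.Dict (Int × Int) Int) (i : Int) :
    PySem.Dict (Int × Int) Int :=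
  let j := i + L - 1
  if pvRS arr i j ≥ k then
    dp.insert (i, j) (dp.getD (i, j) 0
      + ((PySem.List.pyRange i j 1).map (fun m => dp.getD (i, m) 0 * dp.getD (m + 1, j) 0)).sum)
  else dp

def pvInit (arr : List Int) (k : Int) : PySem.Dict (Int × Int) Int :=
  (PySem.List.pyRange 0 ((arr.length : Int)) 1).foldl
    (fun dp i => dp.insert (i, i) (if PySem.List.pyGetD arr i 0 ≥ k then 1 else 0)) PySem.Dict.empty

def pvFinal (arr : List Int) (k : Int) : PySem.Dict (Int × Int) Int :=
  (PySem.List.pyRange 2 ((arr.length : Int) + 1) 1).foldl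
    (fun dp L => (PySem.List.pyRange 0 ((arr.length : Int) - L + 1) 1).foldl (pvStep arr k L) dp)
    (pvInit arr k)

theorem mid_step (arr : List Int) (k : Int) (i j : Int)
    (hi : 0 ≤ i) (hij : i < j) (dp : PySem.Dict (Int × Int) Int) :
    (PySem.List.pyRange i j 1).foldl
      (fun dp m =>
        if (PySem.List.slice arr (some i) (some (m + 1))).sum
             + (PySem.List.slice arr (some (m + 1)) (some (j + 1))).sum ≥ k then
          dp.insert (i, j) (dp.getD (i, j) 0 + dp.getD (i, m) 0 * dp.getD (m + 1, j) 0)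
        else dp) dp
    = pvStep arr k (j - i + 1) dp i := by
  have hj : i + (j - i + 1) - 1 = j := by omega
  unfold pvStep
  simp only [hj]
  have hcond : ∀ m ∈ PySem.List.pyRange i j 1,
      (PySem.List.slice arr (some i) (some (m + 1))).sum
        + (PySem.List.slice arr (some (m + 1)) (some (j + 1))).sum
      = pvRS arr i j := by
    intro m hm
    rw [PySem.List.mem_pyRange_one] at hm
    exact slice_sum_split arr i m j hi hm.1 hm.2
  by_cases hk : pvRS arr i j ≥ k
  · rw [if_pos hk]
    rw [PySem.List.foldl_congr_mem
        (g := fun dp m =>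
          PySem.Dict.insert dp (i, j)
            (dp.getD (i, j) 0 + dp.getD (i, m) 0 * dp.getD (m + 1, j) 0))
        (h := by intro acc m hm; rw [hcond m hm, if_pos hk])]
    apply inner_fold_eq
    · rw [← List.length_pos_iff_ne_nil, PySem.List.length_pyRange_one]
      omega
    · intro m hm
      rw [PySem.List.mem_pyRange_one] at hm
      constructor <;> omega
  · rw [if_neg hk]
    rw [PySem.List.foldl_congr_mem (g := fun dp _ => dp)
        (h := by intro acc m hm; rw [hcond m hm, if_neg hk])]
    exact PySem.List.foldl_ignore _ _

theorem A_eq_final (arr : List Int) (k : Int) :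
    count_merges arr k = (pvFinal arr k).getD (0, (arr.length : Int) - 1) 0 := by
  unfold count_merges pvFinal pvInit
  simp only []
  refine congrArg (fun d => PySem.Dict.getD d (0, (arr.length : Int) - 1) 0) ?_
  apply PySem.List.foldl_congr_mem
  intro dpL length hlen
  rw [PySem.List.mem_pyRange_one] at hlen
  apply PySem.List.foldl_congr_mem
  intro dp i hi
  rw [PySem.List.mem_pyRange_one] at hi
  have h := mid_step arr k i (i + length - 1) (by omega) (by omega) dp
  have hL : i + length - 1 - i + 1 = length := by omega
  rw [hL] at h
  exact h

-- table predicate: after processing all lengths < L, exactly the in-range cells of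
-- width < L hold their interval count, everything else reads 0
def pvTab (arr : List Int) (k : Int) (L : Int) (dp : PySem.Dict (Int × Int) Int) : Prop :=
  ∀ a b : Int, dp.getD (a, b) 0 =
    if 0 ≤ a ∧ a ≤ b ∧ b < (arr.length : Int) ∧ b - a + 1 < L then pvCI arr k a b else 0

theorem foldl_insert_diag (g : Int → Int) :
    ∀ (ms : List Int) (dp : PySem.Dict (Int × Int) Int) (a b : Int),
    ((ms.foldl (fun dp i => dp.insert (i, i) (g i)) dp).getD (a, b) 0)
      = if a = b ∧ a ∈ ms then g a else dp.getD (a, b) 0 := by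
  intro ms
  induction ms with
  | nil => simp
  | cons i t ih =>
    intro dp a b
    simp only [List.foldl_cons]
    rw [ih]
    rw [PySem.Dict.getD_insert]
    by_cases h1 : a = b ∧ a ∈ t
    · rw [if_pos h1, if_pos ⟨h1.1, List.mem_cons_of_mem _ h1.2⟩]
    · rw [if_neg h1]
      by_cases h2 : (a, b) = (i, i)
      · obtain ⟨ha, hb⟩ := Prod.mk.injEq .. ▸ h2
        rw [if_pos h2, if_pos ⟨by rw [ha, hb], by simp [ha]⟩, ha]
      · rw [if_neg h2, if_neg ?_]
        rintro ⟨hab, hmem⟩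
        rcases List.mem_cons.mp hmem with h | h
        · exact h2 (by rw [← hab, h])
        · exact h1 ⟨hab, h⟩

theorem init_tab (arr : List Int) (k : Int) : pvTab arr k 2 (pvInit arr k) := by
  intro a b
  unfold pvInit
  rw [foldl_insert_diag]
  by_cases h : a = b ∧ a ∈ PySem.List.pyRange 0 ((arr.length : Int)) 1
  · obtain ⟨hab, hmem⟩ := h
    rw [PySem.List.mem_pyRange_one] at hmem
    subst hab
    rw [pvCI_diag,
        if_pos (⟨rfl, by rw [PySem.List.mem_pyRange_one]; omega⟩ :
          a = a ∧ a ∈ PySem.List.pyRange 0 ((arr.length : Int)) 1),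
        if_pos (show 0 ≤ a ∧ a ≤ a ∧ a < (arr.length : Int) ∧ a - a + 1 < 2 by omega)]
  · rw [if_neg h]
    have hm : ¬ (0 ≤ a ∧ a ≤ b ∧ b < (arr.length : Int) ∧ b - a + 1 < 2) := by
      intro hc
      exact h ⟨by omega, by rw [PySem.List.mem_pyRange_one]; omega⟩
    rw [if_neg hm, PySem.Dict.getD_empty]

theorem step_tab (arr : List Int) (k L : Int) (hL2 : 2 ≤ L) (hLn : L ≤ (arr.length : Int)) :
    ∀ dp, pvTab arr k L dp →
      pvTab arr k (L + 1)
        ((PySem.List.pyRange 0 ((arr.length : Int) - L + 1) 1).foldl (pvStep arr k L) dp) := by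
  intro dp hdp
  have main := pyRange_foldl_inv
    (fun c dp => ∀ a b : Int, dp.getD (a, b) 0 =
      if 0 ≤ a ∧ a ≤ b ∧ b < (arr.length : Int) ∧ (b - a + 1 < L ∨ (b - a + 1 = L ∧ a < c))
      then pvCI arr k a b else 0)
    (pvStep arr k L) 0 ((arr.length : Int) - L + 1)
    ?_ ((arr.length : Int) - L + 1).toNat 0 dp (by omega) (by omega) (by omega) ?_
  · intro a b
    rw [main a b]
    by_cases hc : 0 ≤ a ∧ a ≤ b ∧ b < (arr.length : Int) ∧ b - a + 1 < L + 1
    · rw [if_pos hc, if_pos (by omega)]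
    · rw [if_neg hc, if_neg (by omega)]
  · -- the step
    intro c dp hc0 hcb hQ
    intro a b
    unfold pvStep
    have hj : c < c + L - 1 := by omega
    have hjn : c + L - 1 < (arr.length : Int) := by omega
    simp only []
    have hself : dp.getD (c, c + L - 1) 0 = 0 := by
      rw [hQ c (c + L - 1), if_neg (by omega)]
    have hsum : ((PySem.List.pyRange c (c + L - 1) 1).map
          (fun m => dp.getD (c, m) 0 * dp.getD (m + 1, c + L - 1) 0)).sum
        = ((PySem.List.pyRange c (c + L - 1) 1).map
          (fun m => pvCI arr k c m * pvCI arr k (m + 1) (c + L - 1))).sum := by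
      congr 1
      apply List.map_congr_left
      intro m hm
      rw [PySem.List.mem_pyRange_one] at hm
      rw [hQ c m, if_pos (by omega), hQ (m + 1) (c + L - 1), if_pos (by omega)]
    by_cases hk : pvRS arr c (c + L - 1) ≥ k
    · rw [if_pos hk, PySem.Dict.getD_insert]
      by_cases hab : (a, b) = (c, c + L - 1)
      · obtain ⟨ha, hb⟩ := Prod.mk.injEq .. ▸ hab
        rw [if_pos hab, hself, hsum, zero_add, if_pos (by constructor <;> omega)]
        rw [ha, hb, pvCI_lt arr k c (c + L - 1) hj, if_pos hk]
      · rw [if_neg hab, hQ a b]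
        have hne : ¬ (a = c ∧ b = c + L - 1) := by
          intro h; exact hab (by rw [h.1, h.2])
        by_cases h1 : 0 ≤ a ∧ a ≤ b ∧ b < (arr.length : Int) ∧ (b - a + 1 < L ∨ (b - a + 1 = L ∧ a < c))
        · rw [if_pos h1, if_pos (by omega)]
        · rw [if_neg h1, if_neg ?_]
          intro h2
          apply h1
          refine ⟨h2.1, h2.2.1, h2.2.2.1, ?_⟩
          rcases h2.2.2.2 with h | h
          · exact Or.inl h
          · refine Or.inr ⟨h.1, ?_⟩
            rcases lt_or_eq_of_le (by omega : a ≤ c) with hlt | heq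
            · exact hlt
            · exact absurd ⟨heq, by omega⟩ hne
    · rw [if_neg hk, hQ a b]
      by_cases h1 : 0 ≤ a ∧ a ≤ b ∧ b < (arr.length : Int) ∧ (b - a + 1 < L ∨ (b - a + 1 = L ∧ a < c))
      · rw [if_pos h1, if_pos (by omega)]
      · rw [if_neg h1]
        by_cases h2 : 0 ≤ a ∧ a ≤ b ∧ b < (arr.length : Int) ∧ (b - a + 1 < L ∨ (b - a + 1 = L ∧ a < c + 1))
        · -- then a = c, b = c + L - 1, and pvCI there is 0 because the range sum fails
          have ha : a = c ∧ b = c + L - 1 := by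
            rcases h2.2.2.2 with h | h
            · exact absurd ⟨h2.1, h2.2.1, h2.2.2.1, Or.inl h⟩ h1
            · constructor <;> omega
          rw [if_pos h2, ha.1, ha.2, pvCI_lt arr k c (c + L - 1) hj, if_neg hk]
        · rw [if_neg h2]
  · -- start: Q 0 from pvTab L
    intro a b
    rw [hdp a b]
    by_cases h1 : 0 ≤ a ∧ a ≤ b ∧ b < (arr.length : Int) ∧ b - a + 1 < L
    · rw [if_pos h1, if_pos (by omega)]
    · rw [if_neg h1, if_neg (by omega)]

theorem final_tab (arr : List Int) (k : Int) (hn : 1 ≤ (arr.length : Int)) :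
    pvTab arr k ((arr.length : Int) + 1) (pvFinal arr k) := by
  unfold pvFinal
  exact pyRange_foldl_inv (pvTab arr k)
    (fun dp L => (PySem.List.pyRange 0 ((arr.length : Int) - L + 1) 1).foldl (pvStep arr k L) dp)
    2 ((arr.length : Int) + 1)
    (fun L dp h2 hb hP => step_tab arr k L h2 (by omega) dp hP)
    ((arr.length : Int) + 1 - 2).toNat 2 (pvInit arr k) (by omega) (by omega) (by omega)
    (init_tab arr k)

theorem A_value (arr : List Int) (k : Int) (hne : arr ≠ []) :
    count_merges arr k = pvCI arr k 0 ((arr.length : Int) - 1) := by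
  have hn : 1 ≤ (arr.length : Int) := by
    have := List.length_pos_iff_ne_nil.mpr hne
    omega
  rw [A_eq_final]
  rw [final_tab arr k hn 0 ((arr.length : Int) - 1)]
  rw [if_pos (by omega)]

-- ================= B-side =================
def pvInv (arr : List Int) (k : Int) (memo : PySem.Dict (Int × Int) Int) : Prop :=
  ∀ p v, memo.get? p = some v → v = pvCI arr k p.1 p.2

theorem goB_correct (arr pre : List Int) (k : Int)
    (hpre : ∀ i j : Int, 0 ≤ i → i ≤ j + 1 → j + 1 ≤ (arr.length : Int) →
      PySem.List.pyGetD pre (j + 1) 0 - PySem.List.pyGetD pre i 0 = pvRS arr i j) :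
    ∀ (fuel : Nat) (i j : Int) (memo : PySem.Dict (Int × Int) Int),
      0 ≤ i → i ≤ j → j < (arr.length : Int) → (j - i).toNat ≤ fuel → pvInv arr k memo →
      (pvGoB arr pre k fuel i j memo).1 = pvCI arr k i j ∧ pvInv arr k (pvGoB arr pre k fuel i j memo).2 := by
  intro fuel
  induction fuel with
  | zero =>
    intro i j memo hi hij hj hf hInv
    have heq : i = j := by omega
    simp only [pvGoB, if_pos heq]
    exact ⟨by rw [heq, pvCI_diag], hInv⟩
  | succ f ih =>
    intro i j memo hi hij hj hf hInv
    by_cases heq : i = j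
    · simp only [pvGoB, if_pos heq]
      exact ⟨by rw [heq, pvCI_diag], hInv⟩
    · have hij' : i < j := by omega
      simp only [pvGoB, if_neg heq]
      cases hm : memo.get? (i, j) with
      | some v =>
        simp only []
        exact ⟨hInv (i, j) v hm, hInv⟩
      | none =>
        have hfold := pyRange_foldl_inv
          (fun c (s : Int × PySem.Dict (Int × Int) Int) =>
            s.1 = ((PySem.List.pyRange i c 1).map
              (fun m => pvCI arr k i m * pvCI arr k (m + 1) j)).sum ∧ pvInv arr k s.2)
          (fun s m =>
            let r1 := pvGoB arr pre k f i m s.2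
            let r2 := pvGoB arr pre k f (m + 1) j r1.2
            (s.1 + r1.1 * r2.1, r2.2))
          i j ?_ (j - i).toNat i ((0 : Int), memo) rfl (le_refl i) (by omega)
          ⟨by rw [PySem.List.pyRange_one_eq_nil (le_refl i)]; simp, hInv⟩
        · rw [hpre i j hi (by omega) (by omega)]
          by_cases hk : pvRS arr i j ≥ k
          · rw [if_pos hk]
            obtain ⟨hv, hI⟩ := hfold
            rw [hv]
            have hval : ((PySem.List.pyRange i j 1).map
                (fun m => pvCI arr k i m * pvCI arr k (m + 1) j)).sum = pvCI arr k i j := by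
              rw [pvCI_lt arr k i j hij', if_pos hk]
            rw [hval]
            refine ⟨rfl, ?_⟩
            intro p v hpv
            rw [PySem.Dict.get?_insert] at hpv
            by_cases hp : p = (i, j)
            · rw [if_pos hp] at hpv
              cases hpv
              rw [hp]
            · rw [if_neg hp] at hpv
              exact hI p v hpv
          · rw [if_neg hk]
            have hval : (0 : Int) = pvCI arr k i j := by
              rw [pvCI_lt arr k i j hij', if_neg hk]
            refine ⟨hval, ?_⟩
            intro p v hpv
            rw [PySem.Dict.get?_insert] at hpv
            by_cases hp : p = (i, j)
            · rw [if_pos hp] at hpv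
              cases hpv
              rw [hp, ← hval]
            · rw [if_neg hp] at hpv
              exact hInv p v hpv
        · intro c s hic hcj hR
          obtain ⟨hs, hI⟩ := hR
          have h1 := ih i c s.2 hi (by omega) (by omega) (by omega) hI
          have h2 := ih (c + 1) j (pvGoB arr pre k f i c s.2).2 (by omega) (by omega) hj (by omega) h1.2
          refine ⟨?_, h2.2⟩
          simp only []
          rw [h1.1, h2.1, hs, PySem.List.pyRange_one_succ_right hic]
          simp
  
theorem B_value (arr : List Int) (k : Int) (hne : arr ≠ []) :
    count_merges_alt arr k = pvCI arr k 0 ((arr.length : Int) - 1) := by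
  have hn : 1 ≤ (arr.length : Int) := by
    have := List.length_pos_iff_ne_nil.mpr hne
    omega
  unfold count_merges_alt
  exact (goB_correct arr _ k
    (fun i j hi hij hj => pre_diff arr i j hi hij hj)
    ((arr.length : Int) - 1).toNat 0 ((arr.length : Int) - 1) PySem.Dict.empty
    (by omega) (by omega) (by omega) (by omega)
    (fun p v hpv => by rw [PySem.Dict.get?_empty] at hpv; cases hpv)).1

-- ===== VERDICT (by name: the statement is the Claim_ definition above) =====
theorem count_merges_spec : Claim_equal_count_merges := by
  intro arr k _ hpre
  unfold Spec_count_merges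
  rw [A_value arr k hpre, B_value arr k hpre]
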